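-- pv_equiv track=rewrite | github.com/EdGrrr/csat2 | csat2/locator.py | partial_format
-- ===== SOURCE A (Python) =====
-- def partial_format(istr, format_dict):
--     '''Operates in the same way as the starndard python format for string
--     interpolation, but doesn't fail if a key is missing'''
--     s = 0
--     outstr = ''
--     while True:
--         try:
--             i = istr.index('{', s)
--             j = istr.index('}', i)
--             outstr += istr[s:i]
--             key = istr[i+1:j]
--             if key in format_dict.keys():
--                 outstr += format_dict[key]
--             else:
--                 outstr += ('{'+key+'}')
--             s = j+1
--         except ValueError:
--             outstr += istr[s:]
--             return outstr
-- ===== SOURCE B (Python) =====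
-- import re
--
-- _TOKEN = re.compile(r'\{([^}]*)\}')
--
-- def partial_format(istr, format_dict):
--     '''Same interpolation as A, but done in one pattern-driven pass of the
--     regex engine instead of a manual index-based while loop.'''
--     def repl(m):
--         key = m.group(1)
--         if key in format_dict:
--             return format_dict[key]
--         return m.group(0)
--     return _TOKEN.sub(repl, istr)
-- ===== Notes on version B (the rewrite author's own statement) =====
-- stated objective: idiomatic
-- what changed: Replaces the manual index()-based while loop and string slicing with a single pattern-driven pass of the regex engine: re.sub(r'\{([^}]*)\}', repl, istr) where repl returns the dict value for known keys and the original match for unknown ones.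
import Mathlib
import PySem

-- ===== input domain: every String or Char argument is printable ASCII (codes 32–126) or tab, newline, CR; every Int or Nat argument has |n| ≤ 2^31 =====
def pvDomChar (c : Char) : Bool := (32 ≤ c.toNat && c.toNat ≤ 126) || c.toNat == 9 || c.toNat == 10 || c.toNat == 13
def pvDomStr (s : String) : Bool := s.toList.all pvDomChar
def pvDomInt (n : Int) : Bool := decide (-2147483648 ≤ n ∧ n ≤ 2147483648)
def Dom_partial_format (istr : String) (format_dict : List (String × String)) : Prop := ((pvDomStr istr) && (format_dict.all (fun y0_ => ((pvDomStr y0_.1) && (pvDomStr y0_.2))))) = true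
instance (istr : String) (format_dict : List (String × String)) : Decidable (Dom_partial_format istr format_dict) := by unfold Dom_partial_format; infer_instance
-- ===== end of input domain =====

-- B replaces A's manual index()-based scanning loop with a single regex-substitution pass
-- (re.sub on \{([^}]*)\}); same return value, no speed claim (objective: idiomatic).

-- Shared primitive: Python dict lookup (first match in the association list).
def pvLookup (format_dict : List (String × String)) (key : List Char) : Option (List Char) :=
  match format_dict with
  | [] => none
  | (k, v) :: rest => if k.toList = key then some v.toList else pvLookup rest key

-- ===== PORT A =====
-- istr.index(c, s): Python raises ValueError when absent; ported as Option (none = the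
-- caught ValueError branch), exact on all inputs.
def pvIdxFrom (c : Char) (cs : List Char) (s : Nat) : Option Nat :=
  ((cs.drop s).findIdx? (· == c)).map (· + s)

-- termination helper for the while loop: a found index is ≥ s and < length
theorem pvIdxFrom_bounds {c : Char} {cs : List Char} {s i : Nat}
    (h : pvIdxFrom c cs s = some i) : s ≤ i ∧ i < cs.length := by
  unfold pvIdxFrom at h
  cases hf : (cs.drop s).findIdx? (· == c) with
  | none => simp [hf] at h
  | some k =>
    simp [hf] at h
    have hk : k < (cs.drop s).length := (List.findIdx?_eq_some_iff_getElem.mp hf).1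
    simp [List.length_drop] at hk
    omega

-- the while loop of A: state s (scan position) and outstr (accumulator)
def pvAloop (format_dict : List (String × String)) (cs : List Char) (s : Nat)
    (out : List Char) : List Char :=
  match hi : pvIdxFrom '{' cs s with
  | none => out ++ cs.drop s                       -- except ValueError: outstr += istr[s:]
  | some i =>
    match hj : pvIdxFrom '}' cs i with
    | none => out ++ cs.drop s                     -- except ValueError: outstr += istr[s:]
    | some j =>
      -- key = istr[i+1:j] (written out at both of its two uses); outstr += istr[s:i] + piece
      pvAloop format_dict cs (j+1) (out ++ (cs.drop s).take (i - s) ++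
        (match pvLookup format_dict ((cs.drop (i+1)).take (j - (i+1))) with  -- if key in format_dict.keys(): …
         | some v => v
         | none => '{' :: ((cs.drop (i+1)).take (j - (i+1)) ++ ['}'])))      -- else: '{'+key+'}'
  termination_by cs.length - s
  decreasing_by
    have h1 := pvIdxFrom_bounds hi
    have h2 := pvIdxFrom_bounds hj
    omega

def partial_format (istr : String) (format_dict : List (String × String)) : String :=
  String.mk (pvAloop format_dict istr.toList 0 [])

-- ===== PORT B =====
-- Hand port of the regex pass re.sub(r'\{([^}]*)\}', repl, istr): a left-to-right scan;
-- at a '{' the engine matches [^}]* up to the first following '}' (exact leftmost-match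
-- semantics of this pattern: no match can start before an unmatched position is emitted).
def pvBgo (format_dict : List (String × String)) : List Char → List Char
  | [] => []
  | c :: rest =>
    if c = '{' then
      match rest.findIdx? (· == '}') with
      | some k =>
        (match pvLookup format_dict (rest.take k) with
         | some v => v                              -- repl: format_dict[key]
         | none => '{' :: (rest.take k ++ ['}']))   -- repl: m.group(0)
          ++ pvBgo format_dict (rest.drop (k+1))
      | none => c :: pvBgo format_dict rest         -- no match starts here
    else c :: pvBgo format_dict rest
  termination_by cs => cs.length
  decreasing_by
    all_goals simp [List.length_drop]

def partial_format_alt (istr : String) (format_dict : List (String × String)) : String :=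
  String.mk (pvBgo format_dict istr.toList)

-- ===== PRECONDITION & SPEC =====
def Spec_partial_format (istr : String) (format_dict : List (String × String)) (out : String) : Prop := out = partial_format_alt istr format_dict
instance (istr : String) (format_dict : List (String × String)) (out : String) : Decidable (Spec_partial_format istr format_dict out) := by unfold Spec_partial_format; infer_instance

-- ===== CLAIM (what is proved, stated in full; the proofs are below) =====
def Claim_equal_partial_format : Prop := ∀ (istr : String) (format_dict : List (String × String)), Dom_partial_format istr format_dict → Spec_partial_format istr format_dict (partial_format istr format_dict)


-- ===== LEMMAS AND PROOFS =====

-- pvIdxFrom characterised through findIdx? on the dropped suffix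
theorem pvIdxFrom_none_iff {c : Char} {cs : List Char} {s : Nat} :
    pvIdxFrom c cs s = none ↔ ∀ x ∈ cs.drop s, ¬ x = c := by
  unfold pvIdxFrom
  simp [List.findIdx?_eq_none_iff]

theorem pvIdxFrom_some_elim {c : Char} {cs : List Char} {s i : Nat}
    (h : pvIdxFrom c cs s = some i) :
    ∃ k, i = k + s ∧ (cs.drop s).findIdx? (· == c) = some k := by
  unfold pvIdxFrom at h
  cases hf : (cs.drop s).findIdx? (· == c) with
  | none => simp [hf] at h
  | some k => simp [hf] at h; exact ⟨k, h.symm, rfl⟩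

theorem take_all_ne {xs : List Char} {c : Char} {k : Nat}
    (h : ∀ j (hj : j < xs.length), j < k → ¬ xs[j] = c) :
    ∀ x ∈ xs.take k, ¬ x = c := by
  intro x hx
  rw [List.mem_take_iff_getElem] at hx
  obtain ⟨j, hj, hx⟩ := hx
  have := h j (by omega) (by omega)
  rw [hx] at this
  exact this

-- pvBgo copies a string containing no '{' unchanged
theorem pvBgo_no_lcb (dict : List (String × String)) :
    ∀ cs : List Char, (∀ x ∈ cs, ¬ x = '{') → pvBgo dict cs = cs := by
  intro cs
  induction cs with
  | nil => intro _; simp [pvBgo]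
  | cons c t ih =>
    intro h
    rw [pvBgo, if_neg (h c (by simp))]
    simp [ih (fun x hx => h x (by simp [hx]))]

-- pvBgo copies a string containing no '}' unchanged
theorem pvBgo_no_rcb (dict : List (String × String)) :
    ∀ cs : List Char, (∀ x ∈ cs, ¬ x = '}') → pvBgo dict cs = cs := by
  intro cs
  induction cs with
  | nil => intro _; simp [pvBgo]
  | cons c t ih =>
    intro h
    have ht : ∀ x ∈ t, ¬ x = '}' := fun x hx => h x (by simp [hx])
    have hfind : t.findIdx? (· == '}') = none := by
      rw [List.findIdx?_eq_none_iff]; intro x hx; simpa using ht x hx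
    rw [pvBgo]
    by_cases hc : c = '{'
    · rw [if_pos hc, hfind]
      simp [hc, ih ht]
    · rw [if_neg hc]
      simp [ih ht]

-- pvBgo passes a '{'-free prefix through unchanged
theorem pvBgo_append_no_lcb (dict : List (String × String)) :
    ∀ (pre xs : List Char), (∀ x ∈ pre, ¬ x = '{') →
      pvBgo dict (pre ++ xs) = pre ++ pvBgo dict xs := by
  intro pre
  induction pre with
  | nil => intro xs _; rfl
  | cons c t ih =>
    intro xs h
    rw [List.cons_append, pvBgo, if_neg (h c (by simp))]
    simp [ih xs (fun x hx => h x (by simp [hx]))]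

-- one step of the scan at a '{' with / without a closing '}'
theorem pvBgo_cons_some (dict : List (String × String)) (rest : List Char) {m : Nat}
    (h : rest.findIdx? (· == '}') = some m) :
    pvBgo dict ('{' :: rest) =
      (match pvLookup dict (rest.take m) with
       | some v => v
       | none => '{' :: (rest.take m ++ ['}'])) ++ pvBgo dict (rest.drop (m + 1)) := by
  rw [pvBgo, if_pos rfl, h]

theorem pvBgo_cons_none (dict : List (String × String)) (rest : List Char)
    (h : rest.findIdx? (· == '}') = none) :
    pvBgo dict ('{' :: rest) = '{' :: pvBgo dict rest := by
  rw [pvBgo, if_pos rfl, h]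

-- the main loop invariant: A's while loop equals out ++ B's scan of the remaining suffix
theorem pvAloop_eq_pvBgo (dict : List (String × String)) :
    ∀ (n : Nat) (cs : List Char) (s : Nat) (out : List Char), cs.length - s ≤ n →
      pvAloop dict cs s out = out ++ pvBgo dict (cs.drop s) := by
  intro n
  induction n with
  | zero =>
    intro cs s out hn
    have hdrop : cs.drop s = [] := by
      apply List.drop_eq_nil_of_le; omega
    have hnone : pvIdxFrom '{' cs s = none := by
      rw [pvIdxFrom_none_iff, hdrop]; simp
    rw [pvAloop]
    split
    · rw [hdrop]; simp [pvBgo]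
    · next i hi => rw [hi] at hnone; exact absurd hnone (by simp)
  | succ n ih =>
    intro cs s out hn
    rw [pvAloop]
    split
    · -- no '{' found from s: A emits the tail; B copies it unchanged
      next hi =>
        rw [pvBgo_no_lcb dict _ (pvIdxFrom_none_iff.mp hi)]
    · next i hi =>
      obtain ⟨k, hik, hf⟩ := pvIdxFrom_some_elim hi
      obtain ⟨hklt, hkget, hkprev⟩ := List.findIdx?_eq_some_iff_getElem.mp hf
      have hilen : i < cs.length := by
        have : k < cs.length - s := by simpa using hklt
        omega
      have hsplit : cs.drop s = (cs.drop s).take k ++ (cs.drop s).drop k :=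
        (List.take_append_drop k (cs.drop s)).symm
      have hdk : (cs.drop s).drop k = cs.drop i := by
        rw [List.drop_drop]; congr 1; omega
      have hdcons : cs.drop i = '{' :: cs.drop (i + 1) := by
        rw [List.drop_eq_getElem_cons hilen]
        congr 1
        have h2 : (cs.drop s)[k]'hklt = '{' := by simpa using hkget
        rw [List.getElem_drop] at h2
        convert h2 using 2
        omega
      have hpre : ∀ x ∈ (cs.drop s).take k, ¬ x = '{' :=
        take_all_ne (fun j' hj' hjk => by simpa using hkprev j' hjk)
      split
      · -- '{' at i but no '}' from i: A emits the tail; B copies it unchanged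
        next hj =>
          have hnorcb : ∀ x ∈ cs.drop i, ¬ x = '}' := pvIdxFrom_none_iff.mp hj
          have hfnone : (cs.drop (i + 1)).findIdx? (· == '}') = none := by
            rw [List.findIdx?_eq_none_iff]
            intro x hx
            have hxm : x ∈ cs.drop i := by rw [hdcons]; simp [hx]
            simpa using hnorcb x hxm
          have htail : ∀ x ∈ cs.drop (i + 1), ¬ x = '}' := fun x hx =>
            hnorcb x (by rw [hdcons]; simp [hx])
          conv_rhs => rw [hsplit, hdk, hdcons]
          rw [pvBgo_append_no_lcb dict _ _ hpre, pvBgo_cons_none dict _ hfnone,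
              pvBgo_no_rcb dict _ htail]
          conv_lhs => rw [hsplit, hdk, hdcons]
      · -- '{' at i and '}' at j: both sides emit the same chunk and continue at j+1
        next j hj =>
          obtain ⟨m, hjm, hg⟩ := pvIdxFrom_some_elim hj
          -- transfer the '}' search onto cs.drop (i+1)
          rw [hdcons, List.findIdx?_cons] at hg
          simp only [show (('{' : Char) == '}') = false by decide] at hg
          obtain ⟨m', hg', hm'⟩ : ∃ m', (cs.drop (i + 1)).findIdx? (· == '}') = some m' ∧
              m = m' + 1 := by
            cases hg2 : (cs.drop (i + 1)).findIdx? (· == '}') with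
            | none => rw [hg2] at hg; simp at hg
            | some m'' => rw [hg2] at hg; simp at hg; exact ⟨m'', rfl, by omega⟩
          have hm'lt : m' < (cs.drop (i + 1)).length :=
            (List.findIdx?_eq_some_iff_getElem.mp hg').1
          have hjlen : j < cs.length := by
            have : m' < cs.length - (i + 1) := by simpa using hm'lt
            omega
          have hji : i < j := by omega
          rw [ih cs (j + 1) _ (by omega)]
          conv_rhs => rw [hsplit, hdk, hdcons]
          rw [pvBgo_append_no_lcb dict _ _ hpre, pvBgo_cons_some dict _ hg']
          have hkey : (cs.drop (i + 1)).take m' = (cs.drop (i + 1)).take (j - (i + 1)) := by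
            congr 1; omega
          have hrest : (cs.drop (i + 1)).drop (m' + 1) = cs.drop (j + 1) := by
            rw [List.drop_drop]; congr 1; omega
          rw [hkey, hrest, show i - s = k by omega]
          cases pvLookup dict ((cs.drop (i + 1)).take (j - (i + 1))) with
          | none => simp
          | some v => simp

-- ===== VERDICT (by name: the statement is the Claim_ definition above) =====
theorem partial_format_spec : Claim_equal_partial_format := by
  intro istr format_dict _
  unfold Spec_partial_format partial_format partial_format_alt
  rw [pvAloop_eq_pvBgo format_dict istr.toList.length istr.toList 0 [] (by omega)]
  simp
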